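-- pv_equiv track=rewrite | github.com/srinivasagudi0/infinity-film-studio | streamlit_app.py | _rough_cut_table_markdown
-- ===== SOURCE A (Python) =====
-- from typing import Any, Callable, Sequence
--
-- def _rough_cut_table_markdown(rows: Sequence[dict[str, Any]]) -> str:
--     lines = [
--         "| Time | Priority | Focus | Issue | Observation | Recommended Cut |",
--         "|---|---|---|---|---|---|",
--     ]
--     for row in rows:
--         lines.append(
--             "| {timestamp} | {priority} | {focus} | {issue} | {observation} | {action} |".format(
--                 timestamp=str(row.get("timestamp", "")).replace("|", "/"),
--                 priority=str(row.get("priority", "")).replace("|", "/"),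
--                 focus=str(row.get("focus", "")).replace("|", "/"),
--                 issue=str(row.get("issue", "")).replace("|", "/"),
--                 observation=str(row.get("observation", "")).replace("|", "/"),
--                 action=str(row.get("action", "")).replace("|", "/"),
--             )
--         )
--     return "\n".join(lines)
-- ===== SOURCE B (Python) =====
-- from typing import Any, Sequence
--
-- _KEYS = ["timestamp", "priority", "focus", "issue", "observation", "action"]
--
-- def _rough_cut_table_markdown(rows: Sequence[dict[str, Any]]) -> str:
--     # Column-major: build each column across all rows, then transpose into body lines.
--     columns = [[str(row.get(k, "")).replace("|", "/") for row in rows] for k in _KEYS]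
--     body = ["| " + " | ".join(cells) + " |" for cells in zip(*columns)]
--     return "\n".join(
--         ["| Time | Priority | Focus | Issue | Observation | Recommended Cut |",
--          "|---|---|---|---|---|---|"] + body)
-- ===== Notes on version B (the rewrite author's own statement) =====
-- stated objective: alternative
-- what changed: B traverses the data column-major: it first builds each of the six escaped columns across all rows, then transposes them with zip(*columns) into the body lines, instead of A's row-major loop formatting six named fields per row.
import Mathlib
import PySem

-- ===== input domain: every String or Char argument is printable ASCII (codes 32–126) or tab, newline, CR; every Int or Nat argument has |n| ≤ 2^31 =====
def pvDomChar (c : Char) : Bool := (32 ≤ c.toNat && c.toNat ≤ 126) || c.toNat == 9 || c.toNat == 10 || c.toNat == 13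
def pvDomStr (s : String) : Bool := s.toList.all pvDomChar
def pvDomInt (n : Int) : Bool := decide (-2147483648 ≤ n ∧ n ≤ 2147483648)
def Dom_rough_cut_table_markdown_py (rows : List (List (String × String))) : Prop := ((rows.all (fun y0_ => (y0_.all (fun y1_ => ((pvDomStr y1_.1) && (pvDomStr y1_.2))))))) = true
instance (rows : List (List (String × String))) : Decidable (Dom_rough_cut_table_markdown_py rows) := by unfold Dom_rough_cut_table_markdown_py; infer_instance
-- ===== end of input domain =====

-- B builds the table column-major (each escaped column across all rows, then a zip-transpose
-- into body lines) instead of A's row-major per-row formatting (objective: alternative).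

-- ===== PORT A =====
-- row.get(k, "") on the association-list dict (first match), then .replace("|", "/")
def pvCellA (row : List (String × String)) (k : String) : String :=
  PySem.Str.replace ((List.lookup k row).getD "") "|" "/"

def rough_cut_table_markdown_py (rows : List (List (String × String))) : String :=
  let lines : List String :=
    ["| Time | Priority | Focus | Issue | Observation | Recommended Cut |",
     "|---|---|---|---|---|---|"]
  let lines := rows.foldl (fun ls row =>
    ls ++ ["| " ++ pvCellA row "timestamp" ++ " | " ++ pvCellA row "priority" ++ " | " ++
           pvCellA row "focus" ++ " | " ++ pvCellA row "issue" ++ " | " ++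
           pvCellA row "observation" ++ " | " ++ pvCellA row "action" ++ " |"]) lines
  PySem.Str.join "\n" lines

-- ===== PORT B =====
def pvKeys : List String := ["timestamp", "priority", "focus", "issue", "observation", "action"]

def pvCellB (row : List (String × String)) (k : String) : String :=
  PySem.Str.replace ((List.lookup k row).getD "") "|" "/"

-- Python's zip(*ls): truncating transpose (stops as soon as any list is exhausted)
def pvZip : List (List String) → List (List String)
  | [] => []
  | ([] :: _) => []
  | ((a :: l) :: ls) =>
    match ls.mapM List.head? with
    | none => []
    | some hs => (a :: hs) :: pvZip (l :: ls.map List.tail)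
termination_by ls => (ls.headD []).length

def rough_cut_table_markdown_py_alt (rows : List (List (String × String))) : String :=
  let columns := pvKeys.map (fun k => rows.map (fun row => pvCellB row k))
  let body := (pvZip columns).map (fun cells => "| " ++ PySem.Str.join " | " cells ++ " |")
  PySem.Str.join "\n"
    (["| Time | Priority | Focus | Issue | Observation | Recommended Cut |",
      "|---|---|---|---|---|---|"] ++ body)

-- ===== PRECONDITION & SPEC =====
def Spec_rough_cut_table_markdown_py (rows : List (List (String × String))) (out : String) : Prop := out = rough_cut_table_markdown_py_alt rows
instance (rows : List (List (String × String))) (out : String) : Decidable (Spec_rough_cut_table_markdown_py rows out) := by unfold Spec_rough_cut_table_markdown_py; infer_instance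

-- ===== CLAIM =====
def Claim_equal_rough_cut_table_markdown_py : Prop := ∀ (rows : List (List (String × String))), Dom_rough_cut_table_markdown_py rows → Spec_rough_cut_table_markdown_py rows (rough_cut_table_markdown_py rows)

-- ===== LEMMAS AND PROOFS =====
-- A's line-accumulating foldl is init ++ map
theorem pv_foldl_append {α β : Type} (g : α → β) (rows : List α) (init : List β) :
    rows.foldl (fun ls row => ls ++ [g row]) init = init ++ rows.map g := by
  induction rows generalizing init with
  | nil => simp
  | cons r rs ih => simp [ih, List.append_assoc]

theorem pv_mapM_head?_map_cons {α : Type} (ks : List α) (h : α → String) (t : α → List String) :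
    (ks.map (fun k => h k :: t k)).mapM List.head? = some (ks.map h) := by
  induction ks with
  | nil => simp
  | cons k ks ih => simp [ih]

-- zip-transpose of the column-major build is the row-major build
theorem pv_pvZip_map {α : Type} (k : String) (ks : List String) (rows : List α)
    (f : α → String → String) :
    pvZip ((k :: ks).map (fun c => rows.map (fun r => f r c)))
      = rows.map (fun r => (k :: ks).map (f r)) := by
  induction rows with
  | nil => simp [pvZip]
  | cons r rs ih =>
    simp only [List.map_cons]
    rw [pvZip]
    simp only [pv_mapM_head?_map_cons ks (fun c => f r c)]
    have htails : (ks.map (fun c => f r c :: rs.map (fun r' => f r' c))).map List.tail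
        = ks.map (fun c => rs.map (fun r' => f r' c)) := by
      simp
    rw [htails]
    simpa using ih

-- the body lines, written A's row-major way and B's transpose way, are the same list
theorem pv_body (rows : List (List (String × String))) :
    rows.map (fun row => "| " ++ pvCellA row "timestamp" ++ " | " ++ pvCellA row "priority" ++ " | " ++
        pvCellA row "focus" ++ " | " ++ pvCellA row "issue" ++ " | " ++
        pvCellA row "observation" ++ " | " ++ pvCellA row "action" ++ " |")
    = (pvZip (pvKeys.map (fun k => rows.map (fun row => pvCellB row k)))).map
        (fun cells => "| " ++ PySem.Str.join " | " cells ++ " |") := by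
  simp only [pvKeys]
  rw [pv_pvZip_map "timestamp" ["priority", "focus", "issue", "observation", "action"] rows pvCellB]
  rw [List.map_map]
  exact List.map_congr_left (fun r _ => by
    apply String.toList_inj.mp
    simp [pvCellA, pvCellB, PySem.Str.toList_join, PySem.Chars.join,
      List.intercalate, List.intersperse, String.toList_append])

-- ===== VERDICT =====
theorem rough_cut_table_markdown_py_spec : Claim_equal_rough_cut_table_markdown_py := by
  intro rows _
  unfold Spec_rough_cut_table_markdown_py rough_cut_table_markdown_py rough_cut_table_markdown_py_alt
  dsimp only
  rw [pv_foldl_append, pv_body rows]
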